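-- pv_equiv track=rewrite | github.com/madhurishah3222/SmartMedicineManagementSystemUsingAIandOCR | main medicine_ocr updated/app.py | normalize_vertical
-- ===== SOURCE A (Python) =====
-- def normalize_vertical(text):
--     lines = text.splitlines()
--     normalized = []
--     i = 0
--     while i < len(lines):
--         line = lines[i].strip()
--         if len(line) == 1 and line.isalnum():
--             run = [line]
--             i += 1
--             while i < len(lines) and len(lines[i].strip()) == 1 and lines[i].strip().isalnum():
--                 run.append(lines[i].strip())
--                 i += 1
--             normalized.append("".join(run))
--         else:
--             normalized.append(line)
--             i += 1
--     return "\n".join(normalized)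
-- ===== SOURCE B (Python) =====
-- def normalize_vertical(text):
--     out = []
--     buf = []  # pending run of single alnum chars
--     for raw in text.splitlines():
--         line = raw.strip()
--         if len(line) == 1 and line.isalnum():
--             buf.append(line)
--         else:
--             if buf:
--                 out.append("".join(buf))
--                 buf = []
--             out.append(line)
--     if buf:
--         out.append("".join(buf))
--     return "\n".join(out)
-- ===== Notes on version B (the rewrite author's own statement) =====
-- stated objective: simpler
-- what changed: Replaced the index-based nested while loops (outer scan plus inner run-collecting scan) by a single for-pass that accumulates the current single-char run in a buffer and flushes it at each non-single line and at the end.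
import Mathlib
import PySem

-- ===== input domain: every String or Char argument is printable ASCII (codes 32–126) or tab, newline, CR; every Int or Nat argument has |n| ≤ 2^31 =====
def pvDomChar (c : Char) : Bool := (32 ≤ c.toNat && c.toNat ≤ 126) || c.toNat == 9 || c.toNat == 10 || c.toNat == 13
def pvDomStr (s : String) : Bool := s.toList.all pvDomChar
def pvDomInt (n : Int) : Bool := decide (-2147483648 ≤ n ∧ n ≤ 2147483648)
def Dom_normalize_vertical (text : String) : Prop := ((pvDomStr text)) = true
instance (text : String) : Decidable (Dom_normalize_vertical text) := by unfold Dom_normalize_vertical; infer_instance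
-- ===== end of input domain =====

-- B replaces A's nested while loops by one pass with a run buffer flushed at boundaries (simpler decomposition, same output).

-- ===== PORT A =====
-- the inner while loop of A: collect the leading run of stripped single alnum lines, return (run, remaining lines)
def pvTakeRunA : List String → List String × List String
  | [] => ([], [])
  | l :: rest =>
    if PySem.Str.len (PySem.Str.strip l) == 1 && PySem.Str.strIsalnum (PySem.Str.strip l) then
      let p := pvTakeRunA rest
      (PySem.Str.strip l :: p.1, p.2)
    else ([], l :: rest)

-- needed for pvGoA's termination
theorem pvTakeRunA_len : ∀ ls : List String, (pvTakeRunA ls).2.length ≤ ls.length := by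
  intro ls
  induction ls with
  | nil => simp [pvTakeRunA]
  | cons l rest ih =>
    simp only [pvTakeRunA]
    split
    · exact Nat.le_succ_of_le ih
    · simp

-- the outer while loop of A
def pvGoA : List String → List String
  | [] => []
  | l :: rest =>
    let line := PySem.Str.strip l
    if PySem.Str.len line == 1 && PySem.Str.strIsalnum line then
      let p := pvTakeRunA rest
      PySem.Str.join "" (line :: p.1) :: pvGoA p.2
    else
      line :: pvGoA rest
termination_by ls => ls.length
decreasing_by
  · exact Nat.lt_succ_of_le (pvTakeRunA_len rest)
  · simp

def normalize_vertical (text : String) : String :=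
  PySem.Str.join "\n" (pvGoA (PySem.Str.splitlines text))

-- ===== PORT B =====
-- single pass: buf holds the pending run of single alnum chars, flushed at each non-single line and at the end
def pvGoB : List String → List String → List String
  | buf, [] => if buf.isEmpty then [] else [PySem.Str.join "" buf]
  | buf, raw :: rest =>
    let line := PySem.Str.strip raw
    if PySem.Str.len line == 1 && PySem.Str.strIsalnum line then
      pvGoB (buf ++ [line]) rest
    else
      (if buf.isEmpty then [] else [PySem.Str.join "" buf]) ++ line :: pvGoB [] rest

def normalize_vertical_alt (text : String) : String :=
  PySem.Str.join "\n" (pvGoB [] (PySem.Str.splitlines text))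

-- ===== PRECONDITION & SPEC =====
def Spec_normalize_vertical (text : String) (out : String) : Prop := out = normalize_vertical_alt text
instance (text : String) (out : String) : Decidable (Spec_normalize_vertical text out) := by unfold Spec_normalize_vertical; infer_instance

-- ===== CLAIM (what is proved, stated in full; the proofs are below) =====
def Claim_equal_normalize_vertical : Prop := ∀ (text : String), Dom_normalize_vertical text → Spec_normalize_vertical text (normalize_vertical text)

-- ===== LEMMAS AND PROOFS =====
-- Core invariant: with an empty buffer B's loop is A's loop; with a nonempty buffer the buffer is
-- prepended to the leading run that A's inner while loop would collect.
theorem pvGoB_spec : ∀ ls : List String,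
    pvGoB [] ls = pvGoA ls ∧
    (∀ buf : List String, buf ≠ [] →
      pvGoB buf ls = PySem.Str.join "" (buf ++ (pvTakeRunA ls).1) :: pvGoA (pvTakeRunA ls).2) := by
  intro ls
  induction ls with
  | nil =>
    constructor
    · simp [pvGoB, pvGoA]
    · intro buf hbuf
      simp [pvGoB, pvGoA, pvTakeRunA, List.isEmpty_iff, hbuf]
  | cons l rest ih =>
    obtain ⟨ih0, ih1⟩ := ih
    constructor
    · by_cases h : (PySem.Str.len (PySem.Str.strip l) == 1 &&
          PySem.Str.strIsalnum (PySem.Str.strip l)) = true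
      · rw [pvGoB, pvGoA]
        simp only [h, if_true, List.nil_append]
        rw [ih1 [PySem.Str.strip l] (by simp)]
        simp
      · rw [pvGoB, pvGoA]
        simp only [h, Bool.false_eq_true, if_false, List.isEmpty_nil, if_true, List.nil_append]
        rw [ih0]
    · intro buf hbuf
      by_cases h : (PySem.Str.len (PySem.Str.strip l) == 1 &&
          PySem.Str.strIsalnum (PySem.Str.strip l)) = true
      · rw [pvGoB, pvTakeRunA]
        simp only [h, if_true]
        rw [ih1 (buf ++ [PySem.Str.strip l]) (by simp)]
        simp
      · rw [pvGoB, pvTakeRunA]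
        simp only [h, Bool.false_eq_true, if_false, List.append_nil]
        rw [ih0, pvGoA]
        simp only [h, Bool.false_eq_true, if_false]
        simp [List.isEmpty_iff, hbuf]

-- ===== VERDICT (by name: the statement is the Claim_ definition above) =====
theorem normalize_vertical_spec : Claim_equal_normalize_vertical := by
  intro text _
  unfold Spec_normalize_vertical normalize_vertical normalize_vertical_alt
  rw [(pvGoB_spec (PySem.Str.splitlines text)).1]
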